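-- pv_equiv track=rewrite | github.com/flext-sh/flext-ldif | src/flext_ldif/servers/_oud/entry.py | extract_and_remove_acl_attributes
-- ===== SOURCE A (Python) =====
-- def extract_and_remove_acl_attributes(
--     attributes_dict: dict[str, list[str]],
--     acl_attribute_names: list[str],
-- ) -> tuple[dict[str, list[str]], dict[str, list[str]], set[str]]:
--     """Extract ACL attributes and remove from active dict.
--
--     Args:
--         attributes_dict: Current attributes dictionary
--         acl_attribute_names: Names of ACL attributes to process
--
--     Returns:
--         Tuple of (new_attributes_dict, commented_acl_values, hidden_attrs)
--
--     """
--     new_attrs: dict[str, list[str]] = dict(attributes_dict)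
--     commented_vals: dict[str, list[str]] = {}
--     hidden_attrs = set()
--
--     for acl_attr in acl_attribute_names:
--         if acl_attr in new_attrs:
--             acl_values = new_attrs[acl_attr]
--             if isinstance(acl_values, list):
--                 commented_vals[acl_attr] = list(acl_values)
--             else:
--                 commented_vals[acl_attr] = [str(acl_values)]
--
--             del new_attrs[acl_attr]
--             hidden_attrs.add(acl_attr.lower())
--
--     return new_attrs, commented_vals, hidden_attrs
-- ===== SOURCE B (Python) =====
-- def extract_and_remove_acl_attributes(
--     attributes_dict: dict[str, list[str]],
--     acl_attribute_names: list[str],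
-- ) -> tuple[dict[str, list[str]], dict[str, list[str]], set[str]]:
--     """Single-pass partition of the attribute dict into non-ACL and ACL entries,
--     then the comment/hide bookkeeping in names order."""
--     acl_set = set(acl_attribute_names)
--     new_attrs: dict[str, list[str]] = {}
--     extracted: dict[str, list[str]] = {}
--     for key, value in attributes_dict.items():
--         if key in acl_set:
--             extracted[key] = list(value) if isinstance(value, list) else [str(value)]
--         else:
--             new_attrs[key] = value
--
--     commented_vals: dict[str, list[str]] = {}
--     hidden_attrs = set()
--     for name in acl_attribute_names:
--         if name in extracted and name not in commented_vals:
--             commented_vals[name] = extracted[name]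
--             hidden_attrs.add(name.lower())
--
--     return new_attrs, commented_vals, hidden_attrs
-- ===== Notes on version B (the rewrite author's own statement) =====
-- stated objective: alternative
-- what changed: B partitions the attribute dict in one pass into non-ACL and ACL entries using a set of ACL names, then builds commented_vals/hidden_attrs by a lookup pass over the names, instead of A's loop over the name list that deletes matching keys from a copied dict.
import Mathlib
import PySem

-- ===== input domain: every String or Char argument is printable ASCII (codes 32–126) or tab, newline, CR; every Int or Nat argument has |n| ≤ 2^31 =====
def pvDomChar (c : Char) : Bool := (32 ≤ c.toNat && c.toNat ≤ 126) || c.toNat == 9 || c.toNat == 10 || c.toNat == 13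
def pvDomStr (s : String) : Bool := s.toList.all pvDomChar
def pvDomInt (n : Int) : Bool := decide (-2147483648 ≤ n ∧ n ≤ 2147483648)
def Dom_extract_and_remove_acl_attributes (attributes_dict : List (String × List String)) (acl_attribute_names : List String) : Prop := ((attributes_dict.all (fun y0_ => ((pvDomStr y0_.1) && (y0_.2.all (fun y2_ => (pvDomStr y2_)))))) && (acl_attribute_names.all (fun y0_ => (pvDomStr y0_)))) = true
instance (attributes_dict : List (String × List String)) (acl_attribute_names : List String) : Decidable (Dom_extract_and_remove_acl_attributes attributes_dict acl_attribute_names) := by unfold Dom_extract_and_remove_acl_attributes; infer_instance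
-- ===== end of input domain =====

-- B replaces A's delete-from-a-copy loop over the ACL-name list by a one-pass partition
-- of the dict plus a lookup pass over the names (alternative decomposition, same cost).

-- ===== PORT A =====
-- Literal port of A: new_attrs := dict(attributes_dict); loop over acl_attribute_names,
-- moving present keys into commented_vals, deleting them and recording key.lower().
-- The values are typed list[str] (List String), so Python's isinstance(acl_values, list)
-- branch is the one taken; list(acl_values) copies the list (identity here).
def extract_and_remove_acl_attributes (attributes_dict : List (String × List String)) (acl_attribute_names : List String) : (List (String × List String)) × (List (String × List String)) × List String :=
  let st :=
    acl_attribute_names.foldl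
      (fun (st : PySem.Dict String (List String) × PySem.Dict String (List String) × PySem.Set String) acl_attr =>
        if st.1.contains acl_attr then
          (st.1.erase acl_attr,
           st.2.1.insert acl_attr (st.1.getD acl_attr []),
           PySem.Set.add st.2.2 (PySem.Str.lower acl_attr))
        else st)
      (PySem.Dict.ofList attributes_dict, PySem.Dict.empty, PySem.Set.empty)
  (st.1.items, st.2.1.items, st.2.2)

-- ===== PORT B =====
-- Literal port of B: partition the dict's items over the ACL-name set, then build
-- commented_vals / hidden_attrs by a lookup pass over the names.
def extract_and_remove_acl_attributes_alt (attributes_dict : List (String × List String)) (acl_attribute_names : List String) : (List (String × List String)) × (List (String × List String)) × List String :=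
  let acl_set := PySem.Set.ofList acl_attribute_names
  let p :=
    (PySem.Dict.ofList attributes_dict).items.foldl
      (fun (p : PySem.Dict String (List String) × PySem.Dict String (List String)) kv =>
        if PySem.Set.contains acl_set kv.1 then (p.1, p.2.insert kv.1 kv.2)
        else (p.1.insert kv.1 kv.2, p.2))
      (PySem.Dict.empty, PySem.Dict.empty)
  let q :=
    acl_attribute_names.foldl
      (fun (q : PySem.Dict String (List String) × PySem.Set String) name =>
        if p.2.contains name && !q.1.contains name then
          (q.1.insert name (p.2.getD name []), PySem.Set.add q.2 (PySem.Str.lower name))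
        else q)
      (PySem.Dict.empty, PySem.Set.empty)
  (p.1.items, q.1.items, q.2)

-- ===== PRECONDITION & SPEC =====
def Spec_extract_and_remove_acl_attributes (attributes_dict : List (String × List String)) (acl_attribute_names : List String) (out : (List (String × List String)) × (List (String × List String)) × List String) : Prop := out = extract_and_remove_acl_attributes_alt attributes_dict acl_attribute_names
instance (attributes_dict : List (String × List String)) (acl_attribute_names : List String) (out : (List (String × List String)) × (List (String × List String)) × List String) : Decidable (Spec_extract_and_remove_acl_attributes attributes_dict acl_attribute_names out) := by unfold Spec_extract_and_remove_acl_attributes; infer_instance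

-- ===== CLAIM (what is proved, stated in full; the proofs are below) =====
def Claim_equal_extract_and_remove_acl_attributes : Prop := ∀ (attributes_dict : List (String × List String)) (acl_attribute_names : List String), Dom_extract_and_remove_acl_attributes attributes_dict acl_attribute_names → Spec_extract_and_remove_acl_attributes attributes_dict acl_attribute_names (extract_and_remove_acl_attributes attributes_dict acl_attribute_names)

-- ===== LEMMAS AND PROOFS =====

theorem pv_contains_erase {ν : Type} (d : PySem.Dict String ν) (k m : String) :
    (d.erase k).contains m = (!(m == k) && d.contains m) := by
  simp only [PySem.Dict.erase, PySem.Dict.contains, List.any_filter]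
  by_cases h : m = k
  · subst h; simp
  · have hcg : (fun (p : String × ν) => !p.1 == k && p.1 == m)
        = (fun (p : String × ν) => p.1 == m) := by
      funext p
      by_cases hp : p.1 = m
      · subst hp; simp [h]
      · simp [hp]
    simp [hcg, h]

theorem pv_get?_erase_of_ne {ν : Type} (d : PySem.Dict String ν) {k m : String} (h : m ≠ k) :
    (d.erase k).get? m = d.get? m := by
  simp only [PySem.Dict.erase, PySem.Dict.get?]
  congr 1
  induction d.items with
  | nil => rfl
  | cons p rest ih =>
    by_cases hp : p.1 = m
    · have hpk : (p.1 == k) = false := by simp [hp, h]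
      simp [List.filter_cons, hpk, List.find?_cons, hp, h]
    · by_cases hk : p.1 = k
      · have hm : (p.1 == m) = false := by simp [hp]
        have hkm : (k == m) = false := by simp; exact fun hh => h hh.symm
        simp [List.filter_cons, hk, List.find?_cons, hm, ih, hkm]
      · have hkf : (p.1 == k) = false := by simp [hk]
        have hm : (p.1 == m) = false := by simp [hp]
        simp [List.filter_cons, hkf, List.find?_cons, hm, ih]

theorem pv_erase_of_not_contains {ν : Type} (d : PySem.Dict String ν) (k : String)
    (h : d.contains k = false) : d.erase k = d := by
  apply PySem.Dict.ext
  simp only [PySem.Dict.erase]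
  apply List.filter_eq_self.2
  intro p hp
  by_cases hpk : p.1 = k
  · exfalso
    have : d.contains k = true := by
      simp only [PySem.Dict.contains, List.any_eq_true]
      exact ⟨p, hp, by simp [hpk]⟩
    rw [h] at this; exact Bool.false_ne_true this
  · simp [hpk]

-- A's loop: the first component evolves by erasing each name
theorem pv_fstA (ns : List String) (st : PySem.Dict String (List String) × PySem.Dict String (List String) × PySem.Set String) :
    (ns.foldl
      (fun (st : PySem.Dict String (List String) × PySem.Dict String (List String) × PySem.Set String) acl_attr =>
        if st.1.contains acl_attr then
          (st.1.erase acl_attr,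
           st.2.1.insert acl_attr (st.1.getD acl_attr []),
           PySem.Set.add st.2.2 (PySem.Str.lower acl_attr))
        else st) st).1
    = ns.foldl (fun d n => d.erase n) st.1 := by
  induction ns generalizing st with
  | nil => rfl
  | cons n ns ih =>
    simp only [List.foldl_cons]
    by_cases h : st.1.contains n
    · simp only [h, if_true]
      exact ih _
    · simp only [Bool.not_eq_true] at h
      simp only [h, Bool.false_eq_true, if_false]
      rw [ih st, pv_erase_of_not_contains st.1 n h]

theorem pv_foldl_erase_items {ν : Type} (ns : List String) (d : PySem.Dict String ν) :
    (ns.foldl (fun d n => d.erase n) d).items = d.items.filter (fun kv => !ns.contains kv.1) := by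
  induction ns generalizing d with
  | nil => simp
  | cons n ns ih =>
    simp only [List.foldl_cons]
    rw [ih]
    show (PySem.Dict.erase d n).items.filter _ = _
    simp only [PySem.Dict.erase, List.filter_filter]
    apply List.filter_congr
    intro kv _
    by_cases h1 : kv.1 = n
    · simp [h1]
    · by_cases h2 : ns.contains kv.1 <;> simp [h1, h2]

-- B's partition loop, split into two independent filters
theorem pv_part (acl_set : PySem.Set String) (xs : List (String × List String))
    (d1 d2 : PySem.Dict String (List String)) :
    xs.foldl
      (fun (p : PySem.Dict String (List String) × PySem.Dict String (List String)) kv =>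
        if PySem.Set.contains acl_set kv.1 then (p.1, p.2.insert kv.1 kv.2)
        else (p.1.insert kv.1 kv.2, p.2)) (d1, d2)
    = ((xs.filter (fun kv => !PySem.Set.contains acl_set kv.1)).foldl (fun d kv => d.insert kv.1 kv.2) d1,
       (xs.filter (fun kv => PySem.Set.contains acl_set kv.1)).foldl (fun d kv => d.insert kv.1 kv.2) d2) := by
  induction xs generalizing d1 d2 with
  | nil => simp
  | cons kv xs ih =>
    by_cases h : PySem.Set.contains acl_set kv.1 = true
    · simp only [List.foldl_cons, List.filter_cons, h, Bool.not_true, if_true, ite_true, ite_false, Bool.false_eq_true]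
      rw [ih]
    · simp only [Bool.not_eq_true] at h
      simp only [List.foldl_cons, List.filter_cons, h, Bool.not_false, ite_true, ite_false, Bool.false_eq_true]
      rw [ih]

-- the simultaneous loop invariant for the commented_vals / hidden_attrs components
theorem pv_loop2 (ex : PySem.Dict String (List String))
    (ns : List String)
    (na cv : PySem.Dict String (List String)) (ha : PySem.Set String)
    (h3 : ∀ n ∈ ns, na.contains n = (ex.contains n && !cv.contains n))
    (h4 : ∀ n ∈ ns, na.contains n = true → na.get? n = ex.get? n) :
    (ns.foldl
      (fun (st : PySem.Dict String (List String) × PySem.Dict String (List String) × PySem.Set String) acl_attr =>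
        if st.1.contains acl_attr then
          (st.1.erase acl_attr,
           st.2.1.insert acl_attr (st.1.getD acl_attr []),
           PySem.Set.add st.2.2 (PySem.Str.lower acl_attr))
        else st) (na, cv, ha)).2
    = ns.foldl
      (fun (q : PySem.Dict String (List String) × PySem.Set String) name =>
        if ex.contains name && !q.1.contains name then
          (q.1.insert name (ex.getD name []), PySem.Set.add q.2 (PySem.Str.lower name))
        else q) (cv, ha) := by
  induction ns generalizing na cv ha with
  | nil => rfl
  | cons n ns ih =>
    simp only [List.foldl_cons]
    have hcond := h3 n (by simp)
    by_cases hc : na.contains n = true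
    · have hget : na.get? n = ex.get? n := h4 n (by simp) hc
      have hbeq : (ex.contains n && !cv.contains n) = true := hcond ▸ hc
      have hgetD : na.getD n [] = ex.getD n [] := by
        simp only [PySem.Dict.getD, hget]
      rw [if_pos hc, if_pos hbeq, hgetD]
      apply ih
      · intro m hm
        rw [pv_contains_erase]
        by_cases hmn : m = n
        · subst hmn
          simp [PySem.Dict.contains_insert_self]
        · have hmn' : (m == n) = false := by simp [hmn]
          rw [PySem.Dict.contains_insert]
          simp only [hmn', Bool.not_false, Bool.true_and, Bool.false_or]
          exact h3 m (by simp [hm])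
      · intro m hm hcm
        rw [pv_contains_erase] at hcm
        by_cases hmn : m = n
        · subst hmn; simp at hcm
        · rw [pv_get?_erase_of_ne na hmn]
          exact h4 m (by simp [hm]) (by simpa [hmn] using hcm)
    · have hc' : na.contains n = false := by simpa using hc
      have hbeq : (ex.contains n && !cv.contains n) = false := hcond ▸ hc'
      rw [if_neg hc, if_neg (by simp [hbeq])]
      apply ih
      · intro m hm; exact h3 m (by simp [hm])
      · intro m hm; exact h4 m (by simp [hm])

-- a fold of inserts over pairs with distinct fresh keys just lays down the pairs
theorem pv_items_fold_insert (xs : List (String × List String))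
    (hx : (xs.map Prod.fst).Nodup) :
    (xs.foldl (fun d kv => d.insert kv.1 kv.2) PySem.Dict.empty).items = xs := by
  have h := PySem.Dict.items_foldl_insert_fresh xs (fun kv => kv.1) (fun kv => kv.2)
      PySem.Dict.empty (by intro a _; exact PySem.Dict.contains_empty _) hx
  simpa using h

-- membership in set(names) as a Bool
theorem pv_set_contains (names : List String) (n : String) :
    PySem.Set.contains (PySem.Set.ofList names) n = names.contains n := by
  rw [Bool.eq_iff_iff]
  constructor
  · intro h
    exact List.contains_iff_mem.2 ((PySem.Set.mem_ofList names n).1 (List.contains_iff_mem.1 h))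
  · intro h
    exact List.contains_iff_mem.2 ((PySem.Set.mem_ofList names n).2 (List.contains_iff_mem.1 h))

-- a dict whose items are a filter of a nodup dict's items: contains agrees where the filter accepts the key
theorem pv_contains_filter (l : PySem.Dict String (List String)) (ex : PySem.Dict String (List String))
    (p : String × List String → Bool)
    (hitems : ex.items = l.items.filter p)
    (n : String) (hp : ∀ v, p (n, v) = true) :
    ex.contains n = l.contains n := by
  simp only [PySem.Dict.contains, hitems, List.any_filter]
  rw [Bool.eq_iff_iff]
  simp only [List.any_eq_true, Bool.and_eq_true]
  constructor
  · rintro ⟨kv, hkv, h⟩; exact ⟨kv, hkv, h.2⟩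
  · rintro ⟨kv, hkv, h⟩
    refine ⟨kv, hkv, ?_, h⟩
    have hn : kv.1 = n := by simpa using h
    have : kv = (n, kv.2) := by rw [← hn]
    rw [this]
    exact hp kv.2

theorem pv_get?_filter (l ex : PySem.Dict String (List String))
    (p : String × List String → Bool)
    (hitems : ex.items = l.items.filter p)
    (hl : l.keys.Nodup)
    (n : String) (hp : ∀ v, p (n, v) = true) (hc : l.contains n = true) :
    l.get? n = ex.get? n := by
  have hex : ex.keys.Nodup := by
    simp only [PySem.Dict.keys, hitems]
    exact ((List.filter_sublist).map _).nodup hl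
  rw [PySem.Dict.contains_eq_isSome_get?] at hc
  obtain ⟨v, hv⟩ := Option.isSome_iff_exists.1 hc
  have hmem : (n, v) ∈ l.items := PySem.Dict.mem_items_of_get?_eq_some l hv
  have hmem' : (n, v) ∈ ex.items := by
    rw [hitems]
    exact List.mem_filter.2 ⟨hmem, hp v⟩
  rw [hv, PySem.Dict.get?_of_mem_items ex hmem' hex]

-- ===== VERDICT (by name: the statement is the Claim_ definition above) =====
theorem extract_and_remove_acl_attributes_spec : Claim_equal_extract_and_remove_acl_attributes := by
  intro ad names _
  unfold Spec_extract_and_remove_acl_attributes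
  simp only [extract_and_remove_acl_attributes, extract_and_remove_acl_attributes_alt]
  rw [pv_part]
  have hlk : ((PySem.Dict.ofList ad).items.map Prod.fst).Nodup := by
    have := PySem.Dict.nodup_keys_ofList (κ := String) (ν := List String) ad
    simpa [PySem.Dict.keys] using this
  have hnodup1 : (((PySem.Dict.ofList ad).items.filter
      (fun kv => !PySem.Set.contains (PySem.Set.ofList names) kv.1)).map Prod.fst).Nodup :=
    ((List.filter_sublist).map _).nodup hlk
  have hnodup2 : (((PySem.Dict.ofList ad).items.filter
      (fun kv => PySem.Set.contains (PySem.Set.ofList names) kv.1)).map Prod.fst).Nodup :=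
    ((List.filter_sublist).map _).nodup hlk
  have hitems2 := pv_items_fold_insert _ hnodup2
  simp only [Prod.mk.injEq]
  refine ⟨?_, ?_⟩
  · -- new_attrs
    rw [pv_fstA, pv_foldl_erase_items, pv_items_fold_insert _ hnodup1]
    apply List.filter_congr
    intro kv _
    rw [pv_set_contains]
  · -- commented_vals and hidden_attrs together
    have h := pv_loop2
      ((((PySem.Dict.ofList ad).items.filter
          (fun kv => PySem.Set.contains (PySem.Set.ofList names) kv.1)).foldl
          (fun d kv => d.insert kv.1 kv.2) PySem.Dict.empty))
      names (PySem.Dict.ofList ad) PySem.Dict.empty PySem.Set.empty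
      (by
        intro n hn
        rw [PySem.Dict.contains_empty, Bool.not_false, Bool.and_true]
        exact (pv_contains_filter _ _ _ hitems2 n (fun v => by
          rw [pv_set_contains]; exact List.contains_iff_mem.2 hn)).symm)
      (by
        intro n hn hc
        refine pv_get?_filter _ _ _ hitems2 ?_ n (fun v => by
          rw [pv_set_contains]; exact List.contains_iff_mem.2 hn) hc
        simpa [PySem.Dict.keys] using hlk)
    rw [h]
    constructor <;> rfl
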